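-- pv_equiv track=rewrite | github.com/Divental/Tasks_of_the_V_Amazinum_Data_Science_Camp_2025 | main.py | first_condition
-- ===== SOURCE A (Python) =====
-- def first_condition(inner_list_numbers_):
--     product_pairs = {}
--     for a, b in inner_list_numbers_:
--         value = a * b
--         if value not in product_pairs:
--             product_pairs[value] = []
--         product_pairs[value].append((a, b))
--
--     possible_prod_correct_pairs = {value: pairs for value, pairs in product_pairs.items() if len(pairs) > 1}
--
--     return possible_prod_correct_pairs
-- ===== SOURCE B (Python) =====
-- def first_condition(inner_list_numbers_):
--     products = [a * b for a, b in inner_list_numbers_]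
--     return {
--         v: [p for p, w in zip(inner_list_numbers_, products) if w == v]
--         for i, v in enumerate(products)
--         if v not in products[:i] and products.count(v) > 1
--     }
-- ===== Notes on version B (the rewrite author's own statement) =====
-- stated objective: alternative
-- what changed: Replaces A's one-pass hash-map grouping (dict of product -> growing list, then filter) with a dict-free comprehension: enumerate the product list, keep each product at its first occurrence ('not in products[:i]') when it occurs more than once, and build its group by a fresh scan of the whole list; no incremental group structure is maintained.
import Mathlib
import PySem

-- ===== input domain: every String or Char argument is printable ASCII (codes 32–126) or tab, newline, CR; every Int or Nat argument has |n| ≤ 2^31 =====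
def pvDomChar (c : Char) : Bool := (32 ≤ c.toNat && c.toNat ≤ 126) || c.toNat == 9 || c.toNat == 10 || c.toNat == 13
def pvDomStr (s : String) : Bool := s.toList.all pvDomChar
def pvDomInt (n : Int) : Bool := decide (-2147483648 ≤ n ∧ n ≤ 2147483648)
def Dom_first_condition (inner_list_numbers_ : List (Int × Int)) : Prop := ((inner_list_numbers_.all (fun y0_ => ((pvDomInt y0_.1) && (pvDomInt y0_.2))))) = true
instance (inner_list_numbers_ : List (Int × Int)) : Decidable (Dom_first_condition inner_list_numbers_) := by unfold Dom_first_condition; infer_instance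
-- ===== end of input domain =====

-- B replaces A's incremental hash-grouping with a scan-based comprehension: for each first occurrence of a product it scans the whole list for its pairs; alternative decomposition (B is O(n^2) vs A's O(n) dict passes).


-- ===== PORT A =====
-- for a, b in …: value = a*b; if value not in product_pairs: product_pairs[value] = []; product_pairs[value].append((a,b))
-- then {value: pairs for value, pairs in product_pairs.items() if len(pairs) > 1}
def first_condition (inner_list_numbers_ : List (Int × Int)) : List (Int × List (Int × Int)) :=
  let product_pairs : PySem.Dict Int (List (Int × Int)) :=
    inner_list_numbers_.foldl (fun d p =>
      let value := p.1 * p.2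
      let d' := if d.contains value then d else d.insert value []
      d'.modify value [] (· ++ [p]))   -- product_pairs[value].append((a, b))
      PySem.Dict.empty
  ((product_pairs.items.filter (fun kv => kv.2.length > 1)))

-- ===== PORT B =====
-- products = [a*b for a,b in xs]; dict comprehension over enumerate(products) keeping v with
-- 'v not in products[:i] and products.count(v) > 1'; the 'not in' guard makes the kept keys
-- distinct, so the comprehension's dict is exactly this assoc list in comprehension order.
def first_condition_alt (inner_list_numbers_ : List (Int × Int)) : List (Int × List (Int × Int)) :=
  let products : List Int := inner_list_numbers_.map (fun p => p.1 * p.2)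
  ((PySem.List.enumerate products).filter (fun iv =>
      !((PySem.List.slice products none (some iv.1)).contains iv.2)
        && decide (PySem.List.count products iv.2 > 1))).map
    (fun iv => (iv.2,
      ((inner_list_numbers_.zip products).filter (fun pw => pw.2 == iv.2)).map (·.1)))

-- ===== PRECONDITION & SPEC =====
def Spec_first_condition (inner_list_numbers_ : List (Int × Int)) (out : List (Int × List (Int × Int))) : Prop := out = first_condition_alt inner_list_numbers_
instance (inner_list_numbers_ : List (Int × Int)) (out : List (Int × List (Int × Int))) : Decidable (Spec_first_condition inner_list_numbers_ out) := by unfold Spec_first_condition; infer_instance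

-- ===== CLAIM (what is proved, stated in full; the proofs are below) =====
def Claim_equal_first_condition : Prop := ∀ (inner_list_numbers_ : List (Int × Int)), Dom_first_condition inner_list_numbers_ → Spec_first_condition inner_list_numbers_ (first_condition inner_list_numbers_)

-- ===== LEMMAS AND PROOFS =====

-- A's conditional "if value not in d: d[value] = []" followed by the append is one Dict.modify step.
theorem stepA_eq_modify (d : PySem.Dict Int (List (Int × Int))) (p : Int × Int) :
    ((if d.contains (p.1 * p.2) then d else d.insert (p.1 * p.2) []).modify (p.1 * p.2) []
      (· ++ [p])) = d.modify (p.1 * p.2) [] (· ++ [p]) := by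
  by_cases h : d.contains (p.1 * p.2)
  · simp [h]
  · simp only [h, Bool.false_eq_true, if_false]
    simp only [PySem.Dict.modify, PySem.Dict.getD_insert_self, PySem.Dict.insert_insert_self,
      PySem.Dict.getD_of_not_contains d [] (by simpa using h), List.nil_append]

-- items of a group-by-first-component fold, from the PySem Dict lemmas.
theorem items_group_pairs (l : List (Int × (Int × Int))) :
    (l.foldl (fun d p => d.modify p.1 [] (· ++ [p.2])) PySem.Dict.empty).items
      = (PySem.List.dedup (l.map (·.1))).map
          (fun c => (c, (l.filter (fun p => p.1 == c)).map (·.2))) := by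
  have hnd := PySem.Dict.nodup_keys_foldl_modify_key l (·.1) []
    (fun _ p => (· ++ [p.2])) PySem.Dict.empty PySem.Dict.nodup_keys_empty
  rw [PySem.Dict.items_eq_map_keys _ hnd []]
  rw [PySem.Dict.keys_foldl_modify_key l (·.1) [] (fun _ p => (· ++ [p.2])) PySem.Dict.empty]
  have hkeys : PySem.Set.update (PySem.Dict.empty : PySem.Dict Int (List (Int × Int))).keys
      (l.map (·.1)) = PySem.List.dedup (l.map (·.1)) := by
    rw [PySem.Dict.keys_empty]; rfl
  rw [hkeys]
  refine List.map_congr_left fun c _ => ?_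
  rw [PySem.Dict.getD_foldl_modify_append l PySem.Dict.empty c, PySem.Dict.getD_empty]
  simp

-- the grouping fold keyed by the product, stated on the raw pair list
theorem items_group (l : List (Int × Int)) :
    (l.foldl (fun d p => d.modify (p.1 * p.2) [] (· ++ [p])) PySem.Dict.empty).items
      = (PySem.List.dedup (l.map (fun p => p.1 * p.2))).map
          (fun c => (c, l.filter (fun p => p.1 * p.2 == c))) := by
  have h := items_group_pairs (l.map (fun p => (p.1 * p.2, p)))
  rw [List.foldl_map] at h
  simpa [List.map_map, List.filter_map, Function.comp_def] using h

-- B's "v not in products[:i]" filter over enumerate picks out exactly the first occurrences: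
-- Set.ofList of the whole list is the prefix's dedup followed by the kept suffix elements.
theorem firstocc_aux (l : List Int) : ∀ (pre : List Int),
    PySem.Set.ofList (pre ++ l)
      = PySem.Set.ofList pre ++
        ((PySem.List.enumerate l (pre.length : Int)).filter (fun iv =>
          !((PySem.List.slice (pre ++ l) none (some iv.1)).contains iv.2))).map (·.2) := by
  induction l with
  | nil => intro pre; simp [PySem.List.enumerate_nil]
  | cons x t ih =>
    intro pre
    rw [PySem.List.enumerate_cons, List.filter_cons]
    have hslice : PySem.List.slice (pre ++ x :: t) none (some (pre.length : Int)) = pre := by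
      rw [PySem.List.slice_to_natCast]
      simp
    have hlist : pre ++ x :: t = (pre ++ [x]) ++ t := by simp
    have iht := ih (pre ++ [x])
    rw [← hlist] at iht
    have hlen : ((pre ++ [x]).length : Int) = (pre.length : Int) + 1 := by simp
    rw [hlen] at iht
    have hofl : PySem.Set.ofList (pre ++ [x]) = PySem.Set.ofList pre ++
        (if pre.contains x then [] else [x]) := by
      have : PySem.Set.ofList (pre ++ [x]) = PySem.Set.add (PySem.Set.ofList pre) x := by
        simp [PySem.Set.ofList, List.foldl_append]
      rw [this, PySem.Set.add]
      by_cases h : pre.contains x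
      · have : PySem.Set.contains (PySem.Set.ofList pre) x = true := by
          simp only [PySem.Set.contains, List.contains_eq_mem, decide_eq_true_eq]
          rw [show PySem.Set.ofList pre = PySem.List.dedup pre from
            (PySem.List.dedup_eq_ofList pre).symm, PySem.List.mem_dedup]
          simpa using h
        simp [show x ∈ pre by simpa using h]
      · have : PySem.Set.contains (PySem.Set.ofList pre) x = false := by
          simp only [PySem.Set.contains, List.contains_eq_mem, decide_eq_false_iff_not]
          rw [show PySem.Set.ofList pre = PySem.List.dedup pre from
            (PySem.List.dedup_eq_ofList pre).symm, PySem.List.mem_dedup]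
          simpa using h
        simp [show x ∉ pre by simpa using h]
    have hcons : PySem.Set.ofList (pre ++ x :: t) = PySem.Set.ofList (pre ++ [x]) ++
        ((PySem.List.enumerate t ((pre.length : Int) + 1)).filter (fun iv =>
          !((PySem.List.slice (pre ++ x :: t) none (some iv.1)).contains iv.2))).map (·.2) := iht
    rw [hcons, hofl, hslice]
    by_cases h : x ∈ pre
    · simp [h, List.contains_eq_mem]
    · simp [h, List.contains_eq_mem]

theorem firstocc_eq_dedup (l : List Int) :
    ((PySem.List.enumerate l).filter (fun iv =>
        !((PySem.List.slice l none (some iv.1)).contains iv.2))).map (·.2)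
      = PySem.List.dedup l := by
  have h := firstocc_aux l []
  simp only [List.nil_append] at h
  rw [PySem.List.dedup_eq_ofList] at *
  simpa [PySem.Set.ofList, PySem.List.enumerate] using h.symm

-- ===== VERDICT (by name: the statement is the Claim_ definition above) =====
theorem first_condition_spec : Claim_equal_first_condition := by
  intro xs _
  unfold Spec_first_condition
  simp only [first_condition, first_condition_alt]
  have hA : (xs.foldl (fun d p =>
      (if d.contains (p.1 * p.2) then d else d.insert (p.1 * p.2) []).modify (p.1 * p.2) []
        (· ++ [p])) PySem.Dict.empty)
      = xs.foldl (fun d p => d.modify (p.1 * p.2) [] (· ++ [p])) PySem.Dict.empty := by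
    congr 1
    funext d p
    exact stepA_eq_modify d p
  rw [hA, items_group]
  set K := xs.map (fun p => p.1 * p.2) with hK
  -- B side: split the conjunction, collapse first-occurrence filter to dedup K
  set q : Int → Bool := fun v => decide (PySem.List.count K v > 1) with hq
  rw [show ((PySem.List.enumerate K).filter (fun iv =>
      !((PySem.List.slice K none (some iv.1)).contains iv.2) && q iv.2))
      = (((PySem.List.enumerate K).filter (fun iv =>
      !((PySem.List.slice K none (some iv.1)).contains iv.2))).filter (fun iv => q iv.2)) by
    rw [List.filter_filter]
    exact List.filter_congr fun a _ => by rw [Bool.and_comm]]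
  -- push map over the filter: keys first, then groups
  have hgrp : ∀ (c : Int),
      ((xs.zip K).filter (fun pw => pw.2 == c)).map (·.1)
        = xs.filter (fun p => p.1 * p.2 == c) := by
    intro c
    have hz : xs.zip K = xs.map (fun p => (p, p.1 * p.2)) := by
      rw [hK]
      have := @List.zip_map' _ _ _ id (fun p : Int × Int => p.1 * p.2) xs
      simpa using this
    rw [hz, List.filter_map, List.map_map]
    simp [Function.comp_def]
  have hBmap : (((PySem.List.enumerate K).filter (fun iv =>
      !((PySem.List.slice K none (some iv.1)).contains iv.2))).filter (fun iv => q iv.2)).map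
      (fun iv => (iv.2, ((xs.zip K).filter (fun pw => pw.2 == iv.2)).map (·.1)))
      = (((PySem.List.dedup K).filter q).map
          (fun c => (c, xs.filter (fun p => p.1 * p.2 == c)))) := by
    have hcomp : (fun iv : Int × Int =>
        (iv.2, ((xs.zip K).filter (fun pw => pw.2 == iv.2)).map (·.1)))
        = (fun c : Int => (c, xs.filter (fun p => p.1 * p.2 == c))) ∘ (·.2) := by
      funext iv
      simp [Function.comp, hgrp iv.2]
    rw [hcomp, ← List.map_map, ← firstocc_eq_dedup K]
    rw [List.filter_map]
    rfl
  rw [hBmap]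
  -- A side: push the length filter through the map
  rw [List.filter_map]
  refine congrArg _ (List.filter_congr fun c _ => ?_)
  have hcnt : PySem.List.count K c = (xs.filter (fun p => p.1 * p.2 == c)).length := by
    rw [PySem.List.count_eq, hK, List.count_eq_countP, List.countP_map,
      List.countP_eq_length_filter]
    rfl
  simp only [Function.comp, hq, hcnt]
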